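-- pv_equiv track=rewrite | github.com/williamcorney/Oralia2 | gui_functions.py | get_finger_changes
-- ===== SOURCE A (Python) =====
-- def get_finger_changes(notes):
--
--         result = []
--         add_next = True  # Flag to add the first note
--
--         for note in notes:
--             if add_next:
--                 result.append(note)
--                 add_next = False  # Reset the flag after adding the first note
--             if note == 1:
--                 add_next = True  # Set the flag to add the next note after '1'
--
--         return result
-- ===== SOURCE B (Python) =====
-- def get_finger_changes(notes):
--     # Stage 1: compute the target positions (0, plus the position after each 1).
--     targets = [0] + [i + 1 for i, v in enumerate(notes) if v == 1]
--     # Stage 2: gather the in-range positions.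
--     return [notes[i] for i in targets if i < len(notes)]
-- ===== Notes on version B (the rewrite author's own statement) =====
-- stated objective: alternative
-- what changed: Replaces A's single stateful pass (mutable add_next flag) by a staged index-gather: first build the list of target positions (0 plus i+1 for every i with notes[i]==1), then gather notes[i] for the in-range targets.
import Mathlib
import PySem

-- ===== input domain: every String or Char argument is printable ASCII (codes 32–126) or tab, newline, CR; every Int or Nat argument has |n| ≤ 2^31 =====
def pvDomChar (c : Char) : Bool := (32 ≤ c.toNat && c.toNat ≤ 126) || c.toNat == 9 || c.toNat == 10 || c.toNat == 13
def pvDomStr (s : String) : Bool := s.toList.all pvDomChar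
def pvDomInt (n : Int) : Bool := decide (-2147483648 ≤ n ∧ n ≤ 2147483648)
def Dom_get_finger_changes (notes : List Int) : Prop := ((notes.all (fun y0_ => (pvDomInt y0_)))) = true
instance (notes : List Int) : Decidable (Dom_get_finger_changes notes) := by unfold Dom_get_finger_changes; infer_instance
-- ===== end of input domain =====

-- B replaces A's stateful flag loop by a staged index-gather (alternative decomposition).

-- ===== PORT A =====
-- the for-loop with state (result, add_next), transliterated
def gfcLoop (notes : List Int) (result : List Int) (add_next : Bool) : List Int :=
  match notes with
  | [] => result
  | note :: rest =>
    let result' := if add_next then result ++ [note] else result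
    let add_next' := if add_next then false else add_next
    let add_next'' := if note == 1 then true else add_next'
    gfcLoop rest result' add_next''

def get_finger_changes (notes : List Int) : List Int :=
  gfcLoop notes [] true

-- ===== PORT B =====
-- stage 1: target positions (0, plus i+1 for each i with notes[i] == 1); stage 2: gather in-range
def get_finger_changes_alt (notes : List Int) : List Int :=
  let targets : List Int :=
    0 :: ((PySem.List.enumerate notes).filter (fun p => p.2 == 1)).map (fun p => p.1 + 1)
  (targets.filter (fun i => decide (i < (notes.length : Int)))).map
    (fun i => (PySem.List.pyGet? notes i).getD 0)

-- ===== PRECONDITION & SPEC =====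
def Spec_get_finger_changes (notes : List Int) (out : List Int) : Prop := out = get_finger_changes_alt notes
instance (notes : List Int) (out : List Int) : Decidable (Spec_get_finger_changes notes out) := by unfold Spec_get_finger_changes; infer_instance

-- ===== CLAIM (what is proved, stated in full; the proofs are below) =====
def Claim_equal_get_finger_changes : Prop := ∀ (notes : List Int), Dom_get_finger_changes notes → Spec_get_finger_changes notes (get_finger_changes notes)

-- ===== LEMMAS AND PROOFS =====

-- functional characterisation of A's loop state: include h iff the flag holds, next flag is (h == 1)
def gfcCore : List Int → Bool → List Int
  | [], _ => []
  | h :: t, flag => (if flag then [h] else []) ++ gfcCore t (h == 1)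

theorem gfcLoop_eq_core (notes : List Int) : ∀ (acc : List Int) (flag : Bool),
    gfcLoop notes acc flag = acc ++ gfcCore notes flag := by
  induction notes with
  | nil => intro acc flag; simp [gfcLoop, gfcCore]
  | cons h t ih =>
    intro acc flag
    simp only [gfcLoop, gfcCore]
    have hb : (h == 1) = decide (h = 1) := by cases h <;> rfl
    cases flag <;> simp [ih, List.append_assoc, hb]

-- the element after each 1 (within the list)
def succ1 : List Int → List Int
  | a :: b :: r => (if a = 1 then [b] else []) ++ succ1 (b :: r)
  | _ => []

theorem succ1_cons (a : Int) (t : List Int) :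
    succ1 (a :: t) = (if a = 1 then t.take 1 else []) ++ succ1 t := by
  cases t <;> simp [succ1]

theorem gfcCore_eq_succ1 (t : List Int) : ∀ (prev : Int),
    gfcCore t (prev == 1) = succ1 (prev :: t) := by
  induction t with
  | nil => intro prev; simp [gfcCore, succ1]
  | cons x rest ih =>
    intro prev
    simp only [gfcCore, succ1]
    by_cases hp : prev = 1 <;> simp [hp, ih x]

-- B's staged gather over a suffix equals succ1 of that suffix
theorem gather_eq_succ1 (t : List Int) : ∀ (pre : List Int),
    ((((PySem.List.enumerate t (pre.length : Int)).filter (fun p => p.2 == 1)).map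
        (fun p => p.1 + 1)).filter (fun i => decide (i < (((pre ++ t).length : Nat) : Int)))).map
      (fun i => (PySem.List.pyGet? (pre ++ t) i).getD 0) = succ1 t := by
  induction t with
  | nil => intro pre; simp [PySem.List.enumerate_nil, succ1]
  | cons a t' ih =>
    intro pre
    have hlen : ((pre.length : Int) + 1) = (((pre ++ [a]).length : Nat) : Int) := by
      simp only [List.length_append, List.length_cons, List.length_nil]; push_cast; ring
    have hrec := ih (pre ++ [a])
    rw [PySem.List.enumerate_cons]
    by_cases ha : a = 1
    · subst ha
      rw [List.filter_cons_of_pos (by simp), List.map_cons]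
      cases t' with
      | nil =>
        have hno : ¬ ((pre.length : Int) + 1 < (((pre ++ [(1 : Int)]).length : Nat) : Int)) := by
          simp only [List.length_append, List.length_cons, List.length_nil]; push_cast; omega
        simp only [PySem.List.enumerate_nil, List.filter_nil, List.map_nil]
        rw [List.filter_cons_of_neg (by simp)]
        simp [succ1]
      | cons b r =>
        have hin : ((pre.length : Int) + 1 < (((pre ++ (1 : Int) :: b :: r).length : Nat) : Int)) := by
          simp only [List.length_append, List.length_cons]; push_cast; omega
        rw [List.filter_cons_of_pos (by simp), List.map_cons]
        have hget : (PySem.List.pyGet? (pre ++ (1 : Int) :: b :: r) ((pre.length : Int) + 1)).getD 0 = b := by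
          have h1 : ((pre.length : Int) + 1) = (((pre.length + 1 : Nat) : Nat) : Int) := by push_cast; ring
          rw [h1, PySem.List.pyGet?_natCast]
          have h2 : pre ++ (1 : Int) :: b :: r = (pre ++ [(1 : Int)]) ++ b :: r := by simp
          rw [h2, List.getElem?_append_right (by simp)]
          simp
        rw [hget, succ1_cons, if_pos rfl]
        have hpre : pre ++ (1 : Int) :: b :: r = (pre ++ [(1 : Int)]) ++ b :: r := by simp
        rw [hlen, hpre, hrec]
        simp [List.take]
    · rw [List.filter_cons_of_neg (by simp [ha])]
      rw [succ1_cons, if_neg ha, List.nil_append]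
      have hpre : pre ++ a :: t' = (pre ++ [a]) ++ t' := by simp
      rw [hlen, hpre]
      exact hrec

-- ===== VERDICT (by name: the statement is the Claim_ definition above) =====
theorem get_finger_changes_spec : Claim_equal_get_finger_changes := by
  intro notes _
  unfold Spec_get_finger_changes get_finger_changes get_finger_changes_alt
  cases notes with
  | nil => simp [gfcLoop, PySem.List.enumerate_nil]
  | cons h t =>
    rw [gfcLoop_eq_core]
    simp only [gfcCore, if_pos, List.nil_append]
    rw [gfcCore_eq_succ1 t h]
    have hmain := gather_eq_succ1 (h :: t) []
    simp only [List.nil_append] at hmain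
    rw [show PySem.List.enumerate (h :: t) = PySem.List.enumerate (h :: t) ((([] : List Int).length : Nat) : Int) from rfl]
    simp only [List.filter_cons]
    rw [if_pos (by simp)]
    simp only [List.map_cons]
    have h0 : (PySem.List.pyGet? (h :: t) 0).getD 0 = h := by
      simp [PySem.List.pyGet?, PySem.List.pyIdx?]
    rw [h0]
    simp only [List.singleton_append]
    exact congrArg (List.cons h) hmain.symm
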